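-- pv_equiv track=rewrite | github.com/robotane/graph-theory-algos | ParcoursEnProfondeur.py | but
-- ===== SOURCE A (Python) =====
-- def but(graphe):
--     """
--     Determine le nombre de chemin de but s pour s quelconque dans le graphe
--
--     Parameters
--     ----------
--     graphe : list
--         Liste d'incidence du graphe.
--
--     Returns
--     -------
--     list
--         Liste ayant pour indices les sommets et pour valeurs le nombre de
--         chemins qui menent a ces sommets.
--
--     """
--     n = len(graphe)
--     parcouru = []
--     bu = []
--     for s in range(n):
--         parcouru.append(False)
--         bu.append(1)
--
--     def profondeur(s):
--         parcouru[s] = True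
--         for t in graphe[s]:
--             if not parcouru[t]:
--                 profondeur(t)
--             bu[s] += bu[t]
--
--     for s in range(n):
--         if not parcouru[s]:
--             profondeur(s)
--     return bu
-- ===== SOURCE B (Python) =====
-- def but(graphe):
--     """Iterative DFS with an explicit stack of (vertex, neighbor-index) frames;
--     same per-vertex accumulation order as the recursive version."""
--     n = len(graphe)
--     visited = [False] * n
--     bu = [1] * n
--     for r in range(n):
--         if not visited[r]:
--             visited[r] = True
--             stack = [[r, 0]]
--             while stack:
--                 s, i = stack[-1]
--                 row = graphe[s]
--                 if i < len(row):
--                     t = row[i]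
--                     if visited[t]:
--                         bu[s] += bu[t]
--                         stack[-1][1] = i + 1
--                     else:
--                         visited[t] = True
--                         stack.append([t, 0])
--                 else:
--                     stack.pop()
--     return bu
-- ===== Notes on version B (the rewrite author's own statement) =====
-- stated objective: alternative
-- what changed: Replaced the recursive inner DFS (closure mutating outer lists) with an iterative DFS driven by an explicit stack of (vertex, neighbor-index) frames that resumes each parent at its exact neighbor position, so the per-vertex accumulation order is preserved without recursion.
import Mathlib
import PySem

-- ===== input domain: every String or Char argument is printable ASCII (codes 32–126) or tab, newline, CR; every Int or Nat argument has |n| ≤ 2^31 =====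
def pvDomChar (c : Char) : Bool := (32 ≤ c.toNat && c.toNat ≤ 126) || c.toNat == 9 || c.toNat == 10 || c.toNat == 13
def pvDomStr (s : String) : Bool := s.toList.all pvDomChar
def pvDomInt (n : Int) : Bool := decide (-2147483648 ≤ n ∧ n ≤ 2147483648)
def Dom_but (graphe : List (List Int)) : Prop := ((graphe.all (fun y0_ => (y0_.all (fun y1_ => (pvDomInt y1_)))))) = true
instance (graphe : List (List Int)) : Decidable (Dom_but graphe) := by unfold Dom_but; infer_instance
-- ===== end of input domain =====

-- B replaces the recursive inner DFS by an explicit-stack iterative DFS (alternative decomposition, same cost);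
-- equality of the RETURN value is what is proved (A mutates only its own locals).

-- ===== PORT A =====
-- Port of A. The nested recursive closure `profondeur` is ported with a fuel
-- parameter (the callers pass fuel = number of vertices, proved sufficient in
-- the lemmas below); every step of the body is literal.
def dfsA (g : List (List Int)) : Nat → Int → List Bool × List Int → List Bool × List Int
  | 0, _, st => st
  | f+1, s, st =>
    (PySem.List.pyGetD g s []).foldl
      (fun st t =>
        let st' := if PySem.List.pyGetD st.1 t true = false then dfsA g f t st else st
        (st'.1, PySem.List.pySetD st'.2 s
          (PySem.List.pyGetD st'.2 s 0 + PySem.List.pyGetD st'.2 t 0)))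
      (PySem.List.pySetD st.1 s true, st.2)

def but (graphe : List (List Int)) : List Int :=
  let n := graphe.length
  let init := (PySem.List.pyRange 0 (n : Int) 1).foldl
    (fun (pb : List Bool × List Int) _ => (pb.1 ++ [false], pb.2 ++ [1])) ([], [])
  ((PySem.List.pyRange 0 (n : Int) 1).foldl
    (fun st s => if PySem.List.pyGetD st.1 s true = false then dfsA graphe n s st else st)
    init).2

-- ===== PORT B =====
-- termination helper for the while-loop of B (cited by `decreasing_by`)
theorem pv_count_set_false : ∀ (l : List Bool) (j : Nat), l[j]? = some false →
    (l.set j true).count false + 1 = l.count false := by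
  intro l
  induction l with
  | nil => intro j h; simp at h
  | cons x xs ih =>
    intro j h
    cases j with
    | zero => simp_all
    | succ j =>
      have := ih j (by simpa using h)
      simp only [List.set_cons_succ, List.count_cons]
      omega

theorem pv_cF_set_lt (l : List Bool) (i : Int)
    (h : PySem.List.pyGetD l i true = false) :
    (PySem.List.pySetD l i true).count false < l.count false := by
  unfold PySem.List.pyGetD PySem.List.pyGet? PySem.List.pySetD PySem.List.pySet? at *
  cases e : PySem.List.pyIdx? l.length i with
  | none => rw [e] at h; simp at h
  | some j =>
    rw [e] at h
    simp only [Option.bind_some] at h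
    cases hj : l[j]? with
    | none => rw [hj] at h; simp at h
    | some x =>
      rw [hj] at h; simp only [Option.getD_some] at h; subst h
      have := pv_count_set_false l j hj
      simp; omega

def runB (g : List (List Int)) : List (Int × Nat) → List Bool × List Int → List Bool × List Int
  | [], st => st
  | (s, i) :: rest, st =>
    if h : i < (PySem.List.pyGetD g s []).length then
      if PySem.List.pyGetD st.1 (PySem.List.pyGetD g s [])[i] true = true then
        runB g ((s, i + 1) :: rest)
          (st.1, PySem.List.pySetD st.2 s
            (PySem.List.pyGetD st.2 s 0 + PySem.List.pyGetD st.2 (PySem.List.pyGetD g s [])[i] 0))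
      else
        runB g (((PySem.List.pyGetD g s [])[i], 0) :: (s, i) :: rest)
          (PySem.List.pySetD st.1 (PySem.List.pyGetD g s [])[i] true, st.2)
    else
      runB g rest st
termination_by fs st =>
  (st.1.count false, (fs.map fun p => (PySem.List.pyGetD g p.1 []).length - p.2).sum, fs.length)
decreasing_by
  · apply Prod.Lex.right
    apply Prod.Lex.left
    simp only [List.map_cons, List.sum_cons]
    omega
  · rename_i hv
    apply Prod.Lex.left
    exact pv_cF_set_lt _ _ (by simpa using hv)
  · have h0 : (PySem.List.pyGetD g s []).length - i = 0 := by omega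
    simp only [List.map_cons, List.sum_cons, h0, Nat.zero_add]
    apply Prod.Lex.right
    apply Prod.Lex.right
    simp

def but_alt (graphe : List (List Int)) : List Int :=
  let n := graphe.length
  ((PySem.List.pyRange 0 (n : Int) 1).foldl
    (fun st r => if PySem.List.pyGetD st.1 r true = false then
        runB graphe [(r, 0)] (PySem.List.pySetD st.1 r true, st.2) else st)
    (List.replicate n false, List.replicate n (1 : Int))).2

-- ===== PRECONDITION & SPEC =====
-- Pre_ excludes graphs containing a neighbour index outside [-n, n): there the Python A
-- (and B alike) raises IndexError. It excludes nothing on which A returns.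
def Pre_but (graphe : List (List Int)) : Prop :=
  ∀ row ∈ graphe, ∀ t ∈ row, -(graphe.length : Int) ≤ t ∧ t < (graphe.length : Int)
instance (graphe : List (List Int)) : Decidable (Pre_but graphe) := by
  unfold Pre_but; infer_instance

def pvWitness_but : List (List Int) := [[1, 2], [2, -1], []]

def Spec_but (graphe : List (List Int)) (out : List Int) : Prop := out = but_alt graphe
instance (graphe : List (List Int)) (out : List Int) : Decidable (Spec_but graphe out) := by
  unfold Spec_but; infer_instance

-- ===== CLAIM (what is proved, stated in full; the proofs are below) =====
def Claim_equal_but : Prop := ∀ (graphe : List (List Int)), Dom_but graphe → Pre_but graphe → Spec_but graphe (but graphe)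

-- ===== LEMMAS AND PROOFS =====

-- the loop body of A's `profondeur`, as a named step function (fuel f for the recursive call)
def stepA (g : List (List Int)) (f : Nat) (s : Int) (st : List Bool × List Int) (t : Int) :
    List Bool × List Int :=
  let st' := if PySem.List.pyGetD st.1 t true = false then dfsA g f t st else st
  (st'.1, PySem.List.pySetD st'.2 s
    (PySem.List.pyGetD st'.2 s 0 + PySem.List.pyGetD st'.2 t 0))

theorem dfsA_succ (g : List (List Int)) (f : Nat) (s : Int) (st : List Bool × List Int) :
    dfsA g (f + 1) s st
      = (PySem.List.pyGetD g s []).foldl (stepA g f s) (PySem.List.pySetD st.1 s true, st.2) := rfl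

-- `PvInv a b`: the visited array `a` arises from `b` by marking (count of unvisited
-- does not grow; every visited entry stays visited)
def PvInv (a b : List Bool) : Prop :=
  a.count false ≤ b.count false ∧
  ∀ x : Int, PySem.List.pyGetD b x true = true → PySem.List.pyGetD a x true = true

theorem inv_refl (a : List Bool) : PvInv a a := ⟨le_refl _, fun _ h => h⟩

theorem inv_trans {a b c : List Bool} (h1 : PvInv a b) (h2 : PvInv b c) : PvInv a c :=
  ⟨le_trans h1.1 h2.1, fun x hx => h1.2 x (h2.2 x hx)⟩

theorem pv_pyIdx_lt (n : Nat) (i : Int) (j : Nat) (h : PySem.List.pyIdx? n i = some j) : j < n := by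
  unfold PySem.List.pyIdx? at h
  by_cases h1 : 0 ≤ i
  · rw [if_pos h1] at h
    by_cases h2 : i < (n : Int)
    · rw [if_pos h2] at h; injection h with h; omega
    · rw [if_neg h2] at h; simp at h
  · rw [if_neg h1] at h
    by_cases h3 : -(n : Int) ≤ i
    · rw [if_pos h3] at h; injection h with h; omega
    · rw [if_neg h3] at h; simp at h

theorem pv_count_set_true_le : ∀ (l : List Bool) (j : Nat),
    (l.set j true).count false ≤ l.count false := by
  intro l
  induction l with
  | nil => intro j; simp
  | cons x xs ih =>
    intro j
    cases j with
    | zero =>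
      cases x <;> simp
    | succ j =>
      have := ih j
      simp only [List.set_cons_succ, List.count_cons]
      omega

theorem pv_getD_pySetD_true (l : List Bool) (i k : Int)
    (h : PySem.List.pyGetD l k true = true) :
    PySem.List.pyGetD (PySem.List.pySetD l i true) k true = true := by
  unfold PySem.List.pySetD PySem.List.pySet?
  cases e : PySem.List.pyIdx? l.length i with
  | none => simpa using h
  | some j =>
    have hj := pv_pyIdx_lt _ _ _ e
    simp only [Option.map_some, Option.getD_some]
    unfold PySem.List.pyGetD PySem.List.pyGet? at h ⊢
    rw [List.length_set]
    cases e2 : PySem.List.pyIdx? l.length k with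
    | none => simp
    | some m =>
      rw [e2] at h
      simp only [Option.bind_some] at h ⊢
      rw [List.getElem?_set]
      by_cases hjm : j = m
      · subst hjm; simp [hj]
      · simpa [hjm] using h

theorem pv_mark_self (l : List Bool) (t : Int) :
    PySem.List.pyGetD (PySem.List.pySetD l t true) t true = true := by
  unfold PySem.List.pySetD PySem.List.pySet? PySem.List.pyGetD PySem.List.pyGet?
  cases e : PySem.List.pyIdx? l.length t with
  | none => simp [e]
  | some j =>
    have hj := pv_pyIdx_lt _ _ _ e
    simp [e, List.length_set, List.getElem?_set, hj]

theorem inv_set (l : List Bool) (i : Int) : PvInv (PySem.List.pySetD l i true) l := by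
  constructor
  · unfold PySem.List.pySetD PySem.List.pySet?
    cases e : PySem.List.pyIdx? l.length i with
    | none => simp
    | some j => simpa using pv_count_set_true_le l j
  · exact fun x hx => pv_getD_pySetD_true l i x hx

theorem pv_cF_pos (l : List Bool) (i : Int) (h : PySem.List.pyGetD l i true = false) :
    0 < l.count false :=
  Nat.lt_of_le_of_lt (Nat.zero_le _) (pv_cF_set_lt l i h)

theorem foldl_inv (step : List Bool × List Int → Int → List Bool × List Int)
    (hstep : ∀ st t, PvInv (step st t).1 st.1) :
    ∀ (ts : List Int) (st : List Bool × List Int), PvInv (ts.foldl step st).1 st.1 := by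
  intro ts
  induction ts with
  | nil => intro st; exact inv_refl _
  | cons t ts ih => intro st; exact inv_trans (ih (step st t)) (hstep st t)

theorem dfsA_inv (g : List (List Int)) :
    ∀ (f : Nat) (s : Int) (st : List Bool × List Int), PvInv (dfsA g f s st).1 st.1 := by
  intro f
  induction f with
  | zero => intro s st; exact inv_refl _
  | succ f ih =>
    intro s st
    rw [dfsA_succ]
    refine inv_trans (foldl_inv _ ?_ _ _) (inv_set st.1 s)
    intro st' t
    simp only [stepA]
    split
    · exact ih t st'
    · exact inv_refl _

theorem stepA_inv (g : List (List Int)) (f : Nat) (s : Int) (st : List Bool × List Int)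
    (t : Int) : PvInv (stepA g f s st t).1 st.1 := by
  simp only [stepA]
  split
  · exact dfsA_inv g f t st
  · exact inv_refl _

theorem foldl_stepA_fuel (g : List (List Int)) (f₁ f₂ : Nat)
    (hrec : ∀ (s' : Int) (st' : List Bool × List Int),
      PySem.List.pyGetD st'.1 s' true = false → st'.1.count false ≤ f₁ →
      st'.1.count false ≤ f₂ → dfsA g f₁ s' st' = dfsA g f₂ s' st') :
    ∀ (ts : List Int) (s : Int) (st : List Bool × List Int),
      st.1.count false ≤ f₁ → st.1.count false ≤ f₂ →
      ts.foldl (stepA g f₁ s) st = ts.foldl (stepA g f₂ s) st := by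
  intro ts
  induction ts with
  | nil => intro s st _ _; rfl
  | cons t ts ih =>
    intro s st h1 h2
    have hstep : stepA g f₁ s st t = stepA g f₂ s st t := by
      simp only [stepA]
      split
      · rw [hrec t st (by assumption) h1 h2]
      · rfl
    rw [List.foldl_cons, List.foldl_cons, hstep]
    exact ih s _ (le_trans (stepA_inv g f₂ s st t).1 h1) (le_trans (stepA_inv g f₂ s st t).1 h2)

theorem dfsA_fuel (g : List (List Int)) :
    ∀ (f₁ f₂ : Nat) (s : Int) (st : List Bool × List Int),
      PySem.List.pyGetD st.1 s true = false → st.1.count false ≤ f₁ →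
      st.1.count false ≤ f₂ → dfsA g f₁ s st = dfsA g f₂ s st := by
  intro f₁
  induction f₁ with
  | zero => intro f₂ s st h h1 _; exact absurd h1 (by have := pv_cF_pos st.1 s h; omega)
  | succ f ih =>
    intro f₂ s st h h1 h2
    have hpos := pv_cF_pos st.1 s h
    obtain ⟨f', rfl⟩ : ∃ f', f₂ = f' + 1 := ⟨f₂ - 1, by omega⟩
    rw [dfsA_succ, dfsA_succ]
    have hlt := pv_cF_set_lt st.1 s h
    exact foldl_stepA_fuel g f f' (fun s' st' h' b1 b2 => ih f' s' st' h' b1 b2) _ s _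
      (by simpa using (by omega : (PySem.List.pySetD st.1 s true).count false ≤ f))
      (by simpa using (by omega : (PySem.List.pySetD st.1 s true).count false ≤ f'))

theorem runB_nil (g : List (List Int)) (st : List Bool × List Int) : runB g [] st = st := by
  rw [runB]

theorem runB_pop (g : List (List Int)) (s : Int) (i : Nat) (rest : List (Int × Nat))
    (st : List Bool × List Int) (h : ¬ i < (PySem.List.pyGetD g s []).length) :
    runB g ((s, i) :: rest) st = runB g rest st := by
  rw [runB, dif_neg h]

theorem runB_adv (g : List (List Int)) (s : Int) (i : Nat) (rest : List (Int × Nat))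
    (st : List Bool × List Int) (h : i < (PySem.List.pyGetD g s []).length)
    (hv : PySem.List.pyGetD st.1 (PySem.List.pyGetD g s [])[i] true = true) :
    runB g ((s, i) :: rest) st
      = runB g ((s, i + 1) :: rest)
          (st.1, PySem.List.pySetD st.2 s
            (PySem.List.pyGetD st.2 s 0 + PySem.List.pyGetD st.2 (PySem.List.pyGetD g s [])[i] 0)) := by
  rw [runB, dif_pos h, if_pos hv]

theorem runB_push (g : List (List Int)) (s : Int) (i : Nat) (rest : List (Int × Nat))
    (st : List Bool × List Int) (h : i < (PySem.List.pyGetD g s []).length)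
    (hv : PySem.List.pyGetD st.1 (PySem.List.pyGetD g s [])[i] true = false) :
    runB g ((s, i) :: rest) st
      = runB g (((PySem.List.pyGetD g s [])[i], 0) :: (s, i) :: rest)
          (PySem.List.pySetD st.1 (PySem.List.pyGetD g s [])[i] true, st.2) := by
  rw [runB, dif_pos h, if_neg (by simp [hv])]

theorem runB_eq (g : List (List Int)) :
    ∀ (N k : Nat) (st : List Bool × List Int) (s : Int) (i : Nat)
      (rest : List (Int × Nat)),
      st.1.count false ≤ N → (PySem.List.pyGetD g s []).length - i ≤ k →
      runB g ((s, i) :: rest) st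
        = runB g rest (((PySem.List.pyGetD g s []).drop i).foldl (stepA g N s) st) := by
  intro N
  induction N using Nat.strong_induction_on with
  | _ N ihN =>
  intro k
  induction k with
  | zero =>
    intro st s i rest hN hk
    rw [runB_pop g s i rest st (by omega), List.drop_eq_nil_of_le (by omega)]
    rfl
  | succ k ihk =>
    intro st s i rest hN hk
    by_cases h : i < (PySem.List.pyGetD g s []).length
    · have hdrop : (PySem.List.pyGetD g s []).drop i
          = (PySem.List.pyGetD g s [])[i] :: (PySem.List.pyGetD g s []).drop (i + 1) :=
        List.drop_eq_getElem_cons h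
      by_cases hv : PySem.List.pyGetD st.1 (PySem.List.pyGetD g s [])[i] true = true
      · rw [runB_adv g s i rest st h hv,
          ihk (st.1, PySem.List.pySetD st.2 s
            (PySem.List.pyGetD st.2 s 0 + PySem.List.pyGetD st.2 (PySem.List.pyGetD g s [])[i] 0))
            s (i + 1) rest hN (by omega), hdrop, List.foldl_cons]
        congr 2
        simp only [stepA]
        rw [if_neg (by simp [hv])]
      · have hv' : PySem.List.pyGetD st.1 (PySem.List.pyGetD g s [])[i] true = false := by
          simpa using hv
        have hpos := pv_cF_pos st.1 _ hv'
        obtain ⟨N', rfl⟩ : ∃ N', N = N' + 1 := ⟨N - 1, by omega⟩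
        have hlt := pv_cF_set_lt st.1 _ hv'
        rw [runB_push g s i rest st h hv']
        rw [ihN N' (by omega) ((PySem.List.pyGetD g (PySem.List.pyGetD g s [])[i] []).length)
          (PySem.List.pySetD st.1 (PySem.List.pyGetD g s [])[i] true, st.2)
          (PySem.List.pyGetD g s [])[i] 0 ((s, i) :: rest) (by simp; omega) (by omega)]
        simp only [List.drop_zero]
        rw [show ((PySem.List.pyGetD g (PySem.List.pyGetD g s [])[i] []).foldl
              (stepA g N' (PySem.List.pyGetD g s [])[i])
              (PySem.List.pySetD st.1 (PySem.List.pyGetD g s [])[i] true, st.2))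
            = dfsA g (N' + 1) (PySem.List.pyGetD g s [])[i] st from
          (dfsA_succ g N' (PySem.List.pyGetD g s [])[i] st).symm]
        have hdinv : PvInv (dfsA g (N' + 1) (PySem.List.pyGetD g s [])[i] st).1
            (PySem.List.pySetD st.1 (PySem.List.pyGetD g s [])[i] true) := by
          rw [dfsA_succ]
          exact foldl_inv _ (stepA_inv g N' _) _ _
        have hdc : (dfsA g (N' + 1) (PySem.List.pyGetD g s [])[i] st).1.count false ≤ N' :=
          le_trans hdinv.1 (by simpa using (by omega :
            (PySem.List.pySetD st.1 (PySem.List.pyGetD g s [])[i] true).count false ≤ N'))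
        rw [ihN N' (by omega) (k + 1) _ s i rest hdc (by omega)]
        congr 1
        rw [hdrop, List.foldl_cons, List.foldl_cons]
        have hmark : PySem.List.pyGetD
            (dfsA g (N' + 1) (PySem.List.pyGetD g s [])[i] st).1
            (PySem.List.pyGetD g s [])[i] true = true :=
          hdinv.2 _ (pv_mark_self st.1 _)
        have hstep1 : stepA g N' s (dfsA g (N' + 1) (PySem.List.pyGetD g s [])[i] st)
              (PySem.List.pyGetD g s [])[i]
            = stepA g (N' + 1) s st (PySem.List.pyGetD g s [])[i] := by
          simp only [stepA]
          rw [if_neg (by simp [hmark]), if_pos hv']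
        rw [hstep1]
        apply foldl_stepA_fuel g N' (N' + 1)
          (fun s' st' h' b1 b2 => dfsA_fuel g N' (N' + 1) s' st' h' b1 b2)
        · simpa only [stepA, hv', if_pos] using hdc
        · simpa only [stepA, hv', if_pos] using (by omega :
            (dfsA g (N' + 1) (PySem.List.pyGetD g s [])[i] st).1.count false ≤ N' + 1)
    · rw [runB_pop g s i rest st h, List.drop_eq_nil_of_le (by omega)]
      rfl

theorem init_eq : ∀ (m : Nat) (a : List Bool) (b : List Int),
    (PySem.List.pyRange 0 (m : Int) 1).foldl
        (fun (pb : List Bool × List Int) _ => (pb.1 ++ [false], pb.2 ++ [1])) (a, b)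
      = (a ++ List.replicate m false, b ++ List.replicate m (1 : Int)) := by
  intro m
  induction m with
  | zero => intro a b; simp [PySem.List.pyRange_one_eq_nil]
  | succ m ih =>
    intro a b
    rw [show ((m + 1 : Nat) : Int) = (m : Int) + 1 by push_cast; ring,
      PySem.List.pyRange_one_succ_right (by positivity), List.foldl_append, ih]
    simp [List.replicate_succ', List.append_assoc]

theorem outer_eq (g : List (List Int)) :
    ∀ (l : List Int) (st : List Bool × List Int), st.1.count false ≤ g.length →
      l.foldl (fun st s => if PySem.List.pyGetD st.1 s true = false
          then dfsA g g.length s st else st) st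
        = l.foldl (fun st r => if PySem.List.pyGetD st.1 r true = false
          then runB g [(r, 0)] (PySem.List.pySetD st.1 r true, st.2) else st) st := by
  intro l
  induction l with
  | nil => intro st _; rfl
  | cons s l ih =>
    intro st hc
    rw [List.foldl_cons, List.foldl_cons]
    by_cases hg : PySem.List.pyGetD st.1 s true = false
    · have hpos := pv_cF_pos st.1 s hg
      have hset := pv_cF_set_lt st.1 s hg
      obtain ⟨n', hn⟩ : ∃ n', g.length = n' + 1 := ⟨g.length - 1, by omega⟩
      have key : dfsA g g.length s st
          = runB g [(s, 0)] (PySem.List.pySetD st.1 s true, st.2) := by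
        rw [hn, dfsA_succ]
        rw [runB_eq g n' ((PySem.List.pyGetD g s []).length) _ s 0 []
          (by simp; omega) (by omega)]
        rw [runB_nil, List.drop_zero]
      rw [if_pos hg, if_pos hg, key]
      apply ih
      rw [← key]
      exact le_trans (dfsA_inv g g.length s st).1 hc
    · rw [if_neg hg, if_neg hg]; exact ih st hc

-- ===== VERDICT (by name: the statement is the Claim_ definition above) =====
theorem but_spec : Claim_equal_but := by
  intro g _ _
  unfold Spec_but but but_alt
  dsimp only
  rw [init_eq, List.nil_append, List.nil_append,
    outer_eq g _ _ (by simp)]
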